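-- pv_equiv track=rewrite | github.com/jonnyterrero/MindMap | Mindmap.py | prioritize_user_preferences
-- ===== SOURCE A (Python) =====
-- from typing import Optional, List, Dict
--
-- def prioritize_user_preferences(interventions: List[str], preferred_interventions: List[str]) -> List[str]:
--     """Prioritize interventions based on user preferences."""
--     if not preferred_interventions:
--         return interventions
--
--     # Move preferred interventions to the front
--     prioritized = []
--     for pref in preferred_interventions:
--         if pref in interventions:
--             prioritized.append(pref)
--             interventions.remove(pref)
--
--     # Add remaining interventions
--     prioritized.extend(interventions)
--     return prioritized
-- ===== SOURCE B (Python) =====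
-- def prioritize_user_preferences(interventions, preferred_interventions):
--     """Prioritize interventions based on user preferences.
--
--     Counting-based O(n+p) rewrite: no in-place mutation of `interventions`
--     (only the return value is equivalent to the original)."""
--     if not preferred_interventions:
--         return interventions
--     counts = {}
--     for x in interventions:
--         counts[x] = counts.get(x, 0) + 1
--     taken = {}
--     front = []
--     for p in preferred_interventions:
--         if taken.get(p, 0) < counts.get(p, 0):
--             taken[p] = taken.get(p, 0) + 1
--             front.append(p)
--     rest = []
--     for x in interventions:
--         t = taken.get(x, 0)
--         if t > 0:
--             taken[x] = t - 1
--         else: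
--             rest.append(x)
--     return front + rest
-- ===== Notes on version B (the rewrite author's own statement) =====
-- stated objective: faster
-- what changed: Replaces A's per-preference membership test plus list.remove (each a linear scan, with in-place mutation) by a hash count of interventions, one pass over the preferences selecting each while its taken count is below its available count, and one pass over interventions skipping exactly the consumed occurrences.
import Mathlib
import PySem

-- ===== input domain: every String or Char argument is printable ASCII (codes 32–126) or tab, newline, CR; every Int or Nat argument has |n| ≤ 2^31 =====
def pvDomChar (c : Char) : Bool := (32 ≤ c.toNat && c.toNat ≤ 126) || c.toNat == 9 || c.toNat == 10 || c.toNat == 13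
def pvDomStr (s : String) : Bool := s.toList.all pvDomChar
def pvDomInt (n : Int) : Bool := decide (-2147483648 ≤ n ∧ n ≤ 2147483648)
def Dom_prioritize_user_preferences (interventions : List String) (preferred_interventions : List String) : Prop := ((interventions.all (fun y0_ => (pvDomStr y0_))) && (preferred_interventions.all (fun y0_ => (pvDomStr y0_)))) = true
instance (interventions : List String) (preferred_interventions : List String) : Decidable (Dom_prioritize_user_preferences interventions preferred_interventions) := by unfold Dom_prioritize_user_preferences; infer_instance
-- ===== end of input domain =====

-- B replaces A's quadratic membership-test-and-remove loop with hash counts and two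
-- linear passes (asymptotically faster). A mutates `interventions` in place (remove);
-- B does not — the equivalence proved here is about the RETURN value only.

-- ===== PORT A =====
-- the loop over preferred_interventions: state = (prioritized, interventions);
-- `pref in interventions` then `interventions.remove(pref)` = List.erase (first
-- occurrence, guarded by membership, exactly Python's list.remove here —
-- PySem.List.remove?_eq_some_erase)
def prioritize_user_preferences (interventions : List String) (preferred_interventions : List String) : List String :=
  if preferred_interventions = [] then interventions
  else
    let st := preferred_interventions.foldl
      (fun (s : List String × List String) pref =>
        if pref ∈ s.2 then (s.1 ++ [pref], s.2.erase pref) else s)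
      ([], interventions)
    st.1 ++ st.2

-- ===== PORT B =====
-- counts = {}; for x in interventions: counts[x] = counts.get(x, 0) + 1
-- front loop over preferred: state = (front, taken);  rest loop: state = (rest, taken)
def prioritize_user_preferences_alt (interventions : List String) (preferred_interventions : List String) : List String :=
  if preferred_interventions = [] then interventions
  else
    let counts : PySem.Dict String Int :=
      interventions.foldl (fun d x => d.insert x (d.getD x 0 + 1)) PySem.Dict.empty
    let ft := preferred_interventions.foldl
      (fun (s : List String × PySem.Dict String Int) p =>
        if s.2.getD p 0 < counts.getD p 0 then
          (s.1 ++ [p], s.2.insert p (s.2.getD p 0 + 1))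
        else s)
      ([], PySem.Dict.empty)
    let rest := interventions.foldl
      (fun (s : List String × PySem.Dict String Int) x =>
        if s.2.getD x 0 > 0 then (s.1, s.2.insert x (s.2.getD x 0 - 1))
        else (s.1 ++ [x], s.2))
      ([], ft.2)
    ft.1 ++ rest.1

-- ===== PRECONDITION & SPEC =====
def Spec_prioritize_user_preferences (interventions : List String) (preferred_interventions : List String) (out : List String) : Prop := out = prioritize_user_preferences_alt interventions preferred_interventions
instance (interventions : List String) (preferred_interventions : List String) (out : List String) : Decidable (Spec_prioritize_user_preferences interventions preferred_interventions out) := by unfold Spec_prioritize_user_preferences; infer_instance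

-- ===== CLAIM (what is proved, stated in full; the proofs are below) =====
def Claim_equal_prioritize_user_preferences : Prop := ∀ (interventions : List String) (preferred_interventions : List String), Dom_prioritize_user_preferences interventions preferred_interventions → Spec_prioritize_user_preferences interventions preferred_interventions (prioritize_user_preferences interventions preferred_interventions)

-- ===== LEMMAS AND PROOFS =====

-- sequential first-occurrence erasures; A's remaining list after processing `front`
def eraseSeq (xs : List String) (front : List String) : List String :=
  front.foldl (fun l p => l.erase p) xs

lemma eraseSeq_empty (front : List String) : eraseSeq [] front = [] := by
  induction front with
  | nil => rfl
  | cons f fs ihf => simpa [eraseSeq, List.erase_nil] using ihf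

lemma count_eraseSeq (front : List String) (xs : List String) (q : String) :
    (eraseSeq xs front).count q = xs.count q - front.count q := by
  induction front generalizing xs with
  | nil => simp [eraseSeq]
  | cons f fs ih =>
    simp only [eraseSeq, List.foldl_cons] at *
    rw [ih]
    rcases eq_or_ne f q with h | h
    · subst h
      simp [List.count_erase_self]
      omega
    · simp [List.count_erase_of_ne (Ne.symm h), h]

lemma eraseSeq_cons_of_mem (front : List String) (x : String) (xs : List String)
    (hx : x ∈ front) : eraseSeq (x :: xs) front = eraseSeq xs (front.erase x) := by
  induction front generalizing xs with
  | nil => simp at hx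
  | cons f fs ih =>
    rcases eq_or_ne f x with h | h
    · subst h
      simp [eraseSeq, List.erase_cons_head]
    · have hx' : x ∈ fs := by
        rcases List.mem_cons.mp hx with h' | h'
        · exact absurd h'.symm h
        · exact h'
      have e1 : (x :: xs).erase f = x :: xs.erase f :=
        List.erase_cons_tail (by simpa using (Ne.symm h))
      have e2 : (f :: fs).erase x = f :: fs.erase x :=
        List.erase_cons_tail (by simpa using h)
      rw [e2]
      simp only [eraseSeq, List.foldl_cons, e1]
      simpa [eraseSeq] using ih (xs := xs.erase f) hx'

lemma eraseSeq_cons_of_not_mem (front : List String) (x : String) (xs : List String)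
    (hx : x ∉ front) : eraseSeq (x :: xs) front = x :: eraseSeq xs front := by
  induction front generalizing xs with
  | nil => simp [eraseSeq]
  | cons f fs ih =>
    have hfx : f ≠ x := fun h => hx (by simp [h])
    have hx' : x ∉ fs := fun h => hx (List.mem_cons_of_mem _ h)
    simp only [eraseSeq, List.foldl_cons]
    rw [List.erase_cons_tail (by simpa using (Ne.symm hfx))]
    simpa [eraseSeq] using ih (xs := xs.erase f) hx'

-- the front loops of A and B run in lockstep
lemma front_loop_eq (xs : List String) (counts : PySem.Dict String Int)
    (hcounts : ∀ q, counts.getD q 0 = (xs.count q : Int))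
    (pf : List String) (front : List String) (tk : PySem.Dict String Int)
    (htk : ∀ q, tk.getD q 0 = (front.count q : Int))
    (hcap : ∀ q, front.count q ≤ xs.count q) :
    let ra := pf.foldl
      (fun (s : List String × List String) pref =>
        if pref ∈ s.2 then (s.1 ++ [pref], s.2.erase pref) else s)
      (front, eraseSeq xs front)
    let rb := pf.foldl
      (fun (s : List String × PySem.Dict String Int) p =>
        if s.2.getD p 0 < counts.getD p 0 then
          (s.1 ++ [p], s.2.insert p (s.2.getD p 0 + 1))
        else s)
      (front, tk)
    ra.1 = rb.1 ∧ ra.2 = eraseSeq xs ra.1 ∧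
      (∀ q, rb.2.getD q 0 = (ra.1.count q : Int)) ∧
      (∀ q, ra.1.count q ≤ xs.count q) := by
  induction pf generalizing front tk with
  | nil => exact ⟨rfl, rfl, htk, hcap⟩
  | cons p ps ih =>
    simp only [List.foldl_cons]
    have hmem : (p ∈ eraseSeq xs front) ↔ (tk.getD p 0 < counts.getD p 0) := by
      rw [htk, hcounts, ← List.count_pos_iff, count_eraseSeq]
      constructor
      · intro h; exact_mod_cast (by omega : front.count p < xs.count p)
      · intro h; have : front.count p < xs.count p := by exact_mod_cast h
        omega
    by_cases hp : p ∈ eraseSeq xs front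
    · have hb : tk.getD p 0 < counts.getD p 0 := hmem.mp hp
      simp only [hp, if_pos, if_pos hb]
      have hnext : eraseSeq xs (front ++ [p]) = (eraseSeq xs front).erase p := by
        simp [eraseSeq]
      have := ih (front ++ [p]) (tk.insert p (tk.getD p 0 + 1))
        (by
          intro q
          rw [PySem.Dict.getD_insert]
          rcases eq_or_ne q p with h | h
          · simp [h, htk, List.count_append]
          · simp [h, htk, List.count_append, Ne.symm h])
        (by
          intro q
          rcases eq_or_ne q p with h | h
          · subst h
            have : front.count q < xs.count q := by
              have := hmem.mp hp
              rw [htk, hcounts] at this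
              exact_mod_cast this
            simp [List.count_append]
            omega
          · simp [List.count_append, Ne.symm h]
            exact hcap q)
      rw [hnext] at this
      exact this
    · have hb : ¬ tk.getD p 0 < counts.getD p 0 := fun h => hp (hmem.mpr h)
      simp only [hp, if_neg hb, if_false]
      exact ih front tk htk hcap

-- B's rest loop reproduces A's final remaining list
lemma rest_loop_eq (xs : List String) (acc : List String)
    (front : List String) (m : PySem.Dict String Int)
    (hm : ∀ q, m.getD q 0 = (front.count q : Int))
    (hcap : ∀ q, front.count q ≤ xs.count q) :
    (xs.foldl
      (fun (s : List String × PySem.Dict String Int) x =>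
        if s.2.getD x 0 > 0 then (s.1, s.2.insert x (s.2.getD x 0 - 1))
        else (s.1 ++ [x], s.2))
      (acc, m)).1 = acc ++ eraseSeq xs front := by
  induction xs generalizing acc front m with
  | nil => simp [eraseSeq_empty]
  | cons x xs' ih =>
    simp only [List.foldl_cons]
    by_cases hx : x ∈ front
    · have hpos : m.getD x 0 > 0 := by
        rw [hm]; exact_mod_cast List.count_pos_iff.mpr hx
      rw [if_pos hpos]
      rw [eraseSeq_cons_of_mem front x xs' hx]
      exact ih acc (front.erase x) (m.insert x (m.getD x 0 - 1))
        (by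
          intro q
          rw [PySem.Dict.getD_insert]
          rcases eq_or_ne q x with h | h
          · subst h
            rw [if_pos rfl, hm, List.count_erase_self]
            have := List.count_pos_iff.mpr hx
            omega
          · rw [if_neg h, hm, List.count_erase_of_ne h])
        (by
          intro q
          have hc := hcap q
          rw [List.count_cons] at hc
          rcases eq_or_ne q x with h | h
          · subst h
            rw [List.count_erase_self]
            simp at hc
            omega
          · rw [List.count_erase_of_ne h]
            simp [Ne.symm h] at hc
            omega)
    · have hzero : ¬ m.getD x 0 > 0 := by
        rw [hm]
        have : front.count x = 0 := List.count_eq_zero.mpr hx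
        simp [this]
      rw [if_neg hzero]
      rw [eraseSeq_cons_of_not_mem front x xs' hx]
      have := ih (acc ++ [x]) front m hm
        (by
          intro q
          have hc := hcap q
          rw [List.count_cons] at hc
          rcases eq_or_ne q x with h | h
          · subst h; simp [List.count_eq_zero.mpr hx]
          · simp [Ne.symm h] at hc
            omega)
      rw [this, List.append_assoc]
      rfl

-- ===== VERDICT (by name: the statement is the Claim_ definition above) =====
theorem prioritize_user_preferences_spec : Claim_equal_prioritize_user_preferences := by
  intro xs pf _
  unfold Spec_prioritize_user_preferences prioritize_user_preferences prioritize_user_preferences_alt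
  by_cases hpf : pf = []
  · simp [hpf]
  · simp only [hpf, if_false]
    have hcounts : ∀ q,
        (xs.foldl (fun d x => d.insert x (d.getD x 0 + 1)) PySem.Dict.empty).getD q 0
          = (xs.count q : Int) := by
      intro q
      rw [PySem.Dict.getD_foldl_insert_add_one, PySem.Dict.getD_empty]
      simp
    have hfront := front_loop_eq xs _ hcounts pf [] PySem.Dict.empty
      (by intro q; simp [PySem.Dict.getD_empty])
      (by intro q; simp)
    simp only [eraseSeq, List.foldl_nil] at hfront
    obtain ⟨h1, h2, h3, h4⟩ := hfront
    have hrest := rest_loop_eq xs [] _ _ h3 h4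
    rw [h2, hrest, List.nil_append, h1]
    simp only [eraseSeq]
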